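-- pv_equiv track=rewrite | github.com/cenodude/CrossWatch | providers/sync/plex/_watchlist.py | _sort_guid_candidates
-- ===== SOURCE A (Python) =====
-- def _sort_guid_candidates(guids: list[str], priority: list[str]) -> list[str]:
--     if not guids:
--         return []
--
--     def score(g: str) -> tuple[int, int]:
--         s = g.lower()
--         order: list[int] = []
--         for p in priority:
--             if p == "imdb" and s.startswith("imdb://"):
--                 order.append(0)
--             elif p == "tmdb" and s.startswith("tmdb://"):
--                 order.append(1)
--             elif p == "tvdb" and s.startswith("tvdb://"):
--                 order.append(2)
--             elif p.startswith("agent:themoviedb") and s.startswith("com.plexapp.agents.themoviedb://"):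
--                 order.append(3 if ":en" in p and "?lang=en" in s else 4)
--             elif p == "agent:imdb" and s.startswith("com.plexapp.agents.imdb://"):
--                 order.append(5)
--         return (min(order) if order else 99, len(s))
--
--     return sorted(guids, key=score)
-- ===== SOURCE B (Python) =====
-- def _sort_guid_candidates(guids: list[str], priority: list[str]) -> list[str]:
--     if not guids:
--         return []
--
--     has_imdb = "imdb" in priority
--     has_tmdb = "tmdb" in priority
--     has_tvdb = "tvdb" in priority
--     has_agent_imdb = "agent:imdb" in priority
--     agent_tmdb = [p for p in priority if p.startswith("agent:themoviedb")]
--     has_agent_tmdb = bool(agent_tmdb)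
--     has_agent_tmdb_en = any(":en" in p for p in agent_tmdb)
--
--     def score(g: str) -> tuple[int, int]:
--         s = g.lower()
--         if s.startswith("imdb://"):
--             r = 0 if has_imdb else 99
--         elif s.startswith("tmdb://"):
--             r = 1 if has_tmdb else 99
--         elif s.startswith("tvdb://"):
--             r = 2 if has_tvdb else 99
--         elif s.startswith("com.plexapp.agents.themoviedb://"):
--             if has_agent_tmdb:
--                 r = 3 if has_agent_tmdb_en and "?lang=en" in s else 4
--             else:
--                 r = 99
--         elif s.startswith("com.plexapp.agents.imdb://"):
--             r = 5 if has_agent_imdb else 99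
--         else:
--             r = 99
--         return (r, len(s))
--
--     return sorted(guids, key=score)
-- ===== Notes on version B (the rewrite author's own statement) =====
-- stated objective: faster
-- what changed: B scans priority once up front to compute six boolean flags, then scores each guid by dispatching directly on its prefix instead of re-looping over priority and taking a min for every guid.
import Mathlib
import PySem

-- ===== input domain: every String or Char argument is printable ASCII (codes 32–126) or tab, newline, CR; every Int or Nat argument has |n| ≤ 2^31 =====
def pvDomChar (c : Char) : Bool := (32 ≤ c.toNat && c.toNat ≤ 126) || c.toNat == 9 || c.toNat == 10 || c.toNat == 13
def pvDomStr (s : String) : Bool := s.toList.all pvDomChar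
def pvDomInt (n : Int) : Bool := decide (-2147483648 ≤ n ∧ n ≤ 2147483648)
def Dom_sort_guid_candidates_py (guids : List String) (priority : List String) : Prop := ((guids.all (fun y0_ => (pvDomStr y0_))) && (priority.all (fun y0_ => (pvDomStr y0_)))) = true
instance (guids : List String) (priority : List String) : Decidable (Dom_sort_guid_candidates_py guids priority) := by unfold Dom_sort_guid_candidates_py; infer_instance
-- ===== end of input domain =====

-- B scans priority once into six boolean flags and scores each guid by direct prefix dispatch,
-- instead of A's per-guid loop over priority with a min; return values proved identical.

-- ===== PORT A =====

-- Python: min(order) if order else 99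
def pyMinD99 (order : List Int) : Int :=
  match PySem.List.min? order (fun x => x) with
  | some m => m
  | none => 99

-- literal port of A's inner 'score'
def pyScoreA (priority : List String) (g : String) : Int × Int :=
  let s := PySem.Str.lower g
  let order : List Int := priority.foldl (fun order p =>
    if p == "imdb" && PySem.Str.startswith s "imdb://" then order ++ [0]
    else if p == "tmdb" && PySem.Str.startswith s "tmdb://" then order ++ [1]
    else if p == "tvdb" && PySem.Str.startswith s "tvdb://" then order ++ [2]
    else if PySem.Str.startswith p "agent:themoviedb" && PySem.Str.startswith s "com.plexapp.agents.themoviedb://" then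
      order ++ [if PySem.Str.isIn ":en" p && PySem.Str.isIn "?lang=en" s then 3 else 4]
    else if p == "agent:imdb" && PySem.Str.startswith s "com.plexapp.agents.imdb://" then order ++ [5]
    else order) []
  (pyMinD99 order, PySem.Str.len s)

def sort_guid_candidates_py (guids : List String) (priority : List String) : List String :=
  if guids.isEmpty then []
  else PySem.List.sorted2 guids (fun g => (pyScoreA priority g).1) (fun g => (pyScoreA priority g).2)

-- ===== PORT B =====

-- B's 'score': direct dispatch on the guid prefix using precomputed flags
def pyScoreB (hi ht hv hai hat haten : Bool) (g : String) : Int × Int :=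
  let s := PySem.Str.lower g
  let r : Int :=
    if PySem.Str.startswith s "imdb://" then (if hi then 0 else 99)
    else if PySem.Str.startswith s "tmdb://" then (if ht then 1 else 99)
    else if PySem.Str.startswith s "tvdb://" then (if hv then 2 else 99)
    else if PySem.Str.startswith s "com.plexapp.agents.themoviedb://" then
      (if hat then (if haten && PySem.Str.isIn "?lang=en" s then 3 else 4) else 99)
    else if PySem.Str.startswith s "com.plexapp.agents.imdb://" then (if hai then 5 else 99)
    else 99
  (r, PySem.Str.len s)

def sort_guid_candidates_py_alt (guids : List String) (priority : List String) : List String :=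
  if guids.isEmpty then []
  else
    let hi := priority.contains "imdb"
    let ht := priority.contains "tmdb"
    let hv := priority.contains "tvdb"
    let hai := priority.contains "agent:imdb"
    let agent_tmdb := priority.filter (fun p => PySem.Str.startswith p "agent:themoviedb")
    let hat := !agent_tmdb.isEmpty
    let haten := agent_tmdb.any (fun p => PySem.Str.isIn ":en" p)
    PySem.List.sorted2 guids (fun g => (pyScoreB hi ht hv hai hat haten g).1)
      (fun g => (pyScoreB hi ht hv hai hat haten g).2)

-- ===== PRECONDITION & SPEC =====
def Spec_sort_guid_candidates_py (guids : List String) (priority : List String) (out : List String) : Prop := out = sort_guid_candidates_py_alt guids priority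
instance (guids : List String) (priority : List String) (out : List String) : Decidable (Spec_sort_guid_candidates_py guids priority out) := by unfold Spec_sort_guid_candidates_py; infer_instance

-- ===== CLAIM (what is proved, stated in full; the proofs are below) =====
def Claim_equal_sort_guid_candidates_py : Prop := ∀ (guids : List String) (priority : List String), Dom_sort_guid_candidates_py guids priority → Spec_sort_guid_candidates_py guids priority (sort_guid_candidates_py guids priority)

-- ===== LEMMAS AND PROOFS =====

-- two distinct literal prefixes cannot both be prefixes of the same string
theorem sw_excl {s p q : String} (hpq : ¬ p.toList <+: q.toList) (hqp : ¬ q.toList <+: p.toList)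
    (h : PySem.Str.startswith s p = true) : PySem.Str.startswith s q = false := by
  rw [← Bool.not_eq_true]
  intro hq
  have h' := (PySem.Chars.startswith_iff _ _).mp (by simpa using h)
  have hq' := (PySem.Chars.startswith_iff _ _).mp (by simpa using hq)
  rcases List.prefix_or_prefix_of_prefix h' hq' with hc | hc
  · exact hpq hc
  · exact hqp hc

theorem foldl_min_map_const {α : Type} (u : List α) (c : Int) :
    (u.map (fun _ => c)).foldl min c = c := by
  induction u with
  | nil => rfl
  | cons a t ih => simpa [min_self] using ih

theorem minD_filter_const (l : List String) (q : String → Bool) (c : Int) :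
    pyMinD99 ((l.filter q).map (fun _ => c)) = if l.any q then c else 99 := by
  induction l with
  | nil => rfl
  | cons a t ih =>
    by_cases hq : q a = true
    · simp only [List.filter_cons, hq, ite_true, List.map_cons, List.any_cons, Bool.true_or]
      unfold pyMinD99
      rw [PySem.List.min?_id_cons, foldl_min_map_const]
    · simpa [hq] using ih

theorem foldl_min_agent (en : String → Bool) (lang : Bool) (t : List String) (a : Int)
    (h : a = 3 ∨ a = 4) :
    (t.map (fun p => if en p && lang then (3:Int) else 4)).foldl min a =
      if t.any (fun p => en p && lang) then 3 else a := by
  induction t generalizing a with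
  | nil => simp
  | cons p t ih =>
    simp only [List.map_cons, List.foldl_cons, List.any_cons]
    by_cases hp : (en p && lang) = true
    · have hmin : min a 3 = 3 := by rcases h with h | h <;> simp [h]
      rw [if_pos hp, hmin, ih 3 (Or.inl rfl), ite_self]
      simp [hp]
    · have hpf : (en p && lang) = false := by simpa using hp
      have hmin : min a 4 = a := by rcases h with h | h <;> simp [h]
      rw [if_neg hp, hmin, ih a h]
      simp [hpf]

theorem minD_agent (m : List String) (en : String → Bool) (lang : Bool) :
    pyMinD99 (m.map (fun p => if en p && lang then (3:Int) else 4)) =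
      if !m.isEmpty then (if m.any en && lang then 3 else 4) else 99 := by
  cases m with
  | nil => rfl
  | cons p t =>
    unfold pyMinD99
    simp only [List.map_cons]
    rw [PySem.List.min?_id_cons,
      foldl_min_agent en lang t _ (by by_cases h : (en p && lang) = true <;> simp [h])]
    simp only [List.isEmpty_cons, Bool.not_false, ite_true]
    cases lang with
    | false => simp
    | true =>
      by_cases h1 : en p = true <;> by_cases h2 : t.any en = true <;>
        simp [h1, h2, List.any_cons]

theorem score_eq (priority : List String) (g : String) :
    pyScoreA priority g =
      pyScoreB (priority.contains "imdb") (priority.contains "tmdb") (priority.contains "tvdb")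
        (priority.contains "agent:imdb")
        (!(priority.filter (fun p => PySem.Str.startswith p "agent:themoviedb")).isEmpty)
        ((priority.filter (fun p => PySem.Str.startswith p "agent:themoviedb")).any
          (fun p => PySem.Str.isIn ":en" p)) g := by
  simp only [pyScoreA, pyScoreB]
  set s := PySem.Str.lower g with hs
  cases h0 : PySem.Str.startswith s "imdb://" with
  | true =>
    have h1 := sw_excl (p := "imdb://") (q := "tmdb://") (by decide) (by decide) h0
    have h2 := sw_excl (p := "imdb://") (q := "tvdb://") (by decide) (by decide) h0
    have h3 := sw_excl (p := "imdb://") (q := "com.plexapp.agents.themoviedb://") (by decide) (by decide) h0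
    have h4 := sw_excl (p := "imdb://") (q := "com.plexapp.agents.imdb://") (by decide) (by decide) h0
    simp only [h0, h1, h2, h3, h4, Bool.and_true, Bool.and_false, ite_true, ite_false,
      if_neg Bool.false_ne_true]
    rw [PySem.List.foldl_append_if (p := fun p => p == "imdb") (f := fun _ => (0:Int)),
      List.nil_append, minD_filter_const, List.any_beq']
  | false =>
  cases h1 : PySem.Str.startswith s "tmdb://" with
  | true =>
    have h2 := sw_excl (p := "tmdb://") (q := "tvdb://") (by decide) (by decide) h1
    have h3 := sw_excl (p := "tmdb://") (q := "com.plexapp.agents.themoviedb://") (by decide) (by decide) h1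
    have h4 := sw_excl (p := "tmdb://") (q := "com.plexapp.agents.imdb://") (by decide) (by decide) h1
    simp only [h0, h1, h2, h3, h4, Bool.and_true, Bool.and_false, ite_true, ite_false,
      if_neg Bool.false_ne_true]
    rw [PySem.List.foldl_append_if (p := fun p => p == "tmdb") (f := fun _ => (1:Int)),
      List.nil_append, minD_filter_const, List.any_beq']
  | false =>
  cases h2 : PySem.Str.startswith s "tvdb://" with
  | true =>
    have h3 := sw_excl (p := "tvdb://") (q := "com.plexapp.agents.themoviedb://") (by decide) (by decide) h2
    have h4 := sw_excl (p := "tvdb://") (q := "com.plexapp.agents.imdb://") (by decide) (by decide) h2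
    simp only [h0, h1, h2, h3, h4, Bool.and_true, Bool.and_false, ite_true, ite_false,
      if_neg Bool.false_ne_true]
    rw [PySem.List.foldl_append_if (p := fun p => p == "tvdb") (f := fun _ => (2:Int)),
      List.nil_append, minD_filter_const, List.any_beq']
  | false =>
  cases h3 : PySem.Str.startswith s "com.plexapp.agents.themoviedb://" with
  | true =>
    have h4 := sw_excl (p := "com.plexapp.agents.themoviedb://") (q := "com.plexapp.agents.imdb://") (by decide) (by decide) h3
    simp only [h0, h1, h2, h3, h4, Bool.and_true, Bool.and_false, ite_true, ite_false,
      if_neg Bool.false_ne_true]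
    rw [PySem.List.foldl_append_if
        (p := fun p => PySem.Str.startswith p "agent:themoviedb")
        (f := fun p => if PySem.Str.isIn ":en" p && PySem.Str.isIn "?lang=en" s then (3:Int) else 4),
      List.nil_append, minD_agent]
  | false =>
  cases h4 : PySem.Str.startswith s "com.plexapp.agents.imdb://" with
  | true =>
    simp only [h0, h1, h2, h3, h4, Bool.and_true, Bool.and_false, ite_true, ite_false,
      if_neg Bool.false_ne_true]
    rw [PySem.List.foldl_append_if (p := fun p => p == "agent:imdb") (f := fun _ => (5:Int)),
      List.nil_append, minD_filter_const, List.any_beq']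
  | false =>
    simp only [h0, h1, h2, h3, h4, Bool.and_true, Bool.and_false, ite_true, ite_false,
      if_neg Bool.false_ne_true, PySem.List.foldl_ignore]
    rfl

-- ===== VERDICT (by name: the statement is the Claim_ definition above) =====
theorem sort_guid_candidates_py_spec : Claim_equal_sort_guid_candidates_py := by
  intro guids priority _
  unfold Spec_sort_guid_candidates_py sort_guid_candidates_py sort_guid_candidates_py_alt
  simp only [score_eq]
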